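-- pv_equiv track=rewrite | github.com/hyung-nam/nonggu | app.py | build_context_and_refs
-- ===== SOURCE A (Python) =====
-- MAX_CTX_CHUNKS = 4
--
-- MAX_CHARS_PER_CHUNK = 650
--
-- MAX_REF_DOCS = 2
--
-- def build_context_and_refs(hits):
--     ctx_blocks = []
--     ref_links = []
--     seen = set()
--
--     for doc, m in hits:
--         title = (m.get("title") or "").strip()
--         date = (m.get("date") or "").strip()
--         url = (m.get("url") or "").strip()
--         heading = (m.get("heading_path") or "").strip()
--
--         if url and url not in seen and len(ref_links) < MAX_REF_DOCS:
--             seen.add(url)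
--             ref_links.append(f"- {title} ({date}) {url}")
--
--         if len(ctx_blocks) < MAX_CTX_CHUNKS:
--             snippet = (doc or "").strip()
--             if len(snippet) > MAX_CHARS_PER_CHUNK:
--                 snippet = snippet[:MAX_CHARS_PER_CHUNK] + "…"
--             ctx_blocks.append(f"[{title}] {date} {url}\nheading: {heading}\n{snippet}")
--
--         if len(ref_links) >= MAX_REF_DOCS and len(ctx_blocks) >= MAX_CTX_CHUNKS:
--             break
--
--     return "\n\n---\n\n".join(ctx_blocks), "\n".join(ref_links)
-- ===== SOURCE B (Python) =====
-- MAX_CTX_CHUNKS = 4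
-- MAX_CHARS_PER_CHUNK = 650
-- MAX_REF_DOCS = 2
--
--
-- def _field(m, key):
--     return (m.get(key) or "").strip()
--
--
-- def _block(doc, m):
--     snippet = (doc or "").strip()
--     if len(snippet) > MAX_CHARS_PER_CHUNK:
--         snippet = snippet[:MAX_CHARS_PER_CHUNK] + "…"
--     return (f"[{_field(m, 'title')}] {_field(m, 'date')} {_field(m, 'url')}"
--             f"\nheading: {_field(m, 'heading_path')}\n{snippet}")
--
--
-- def build_context_and_refs(hits):
--     hits = list(hits)  # materialize: allows two independent passes
--
--     # pass 1: reference links = first MAX_REF_DOCS distinct truthy urls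
--     ref_links = []
--     seen = set()
--     for doc, m in hits:
--         url = _field(m, "url")
--         if url and url not in seen and len(ref_links) < MAX_REF_DOCS:
--             seen.add(url)
--             ref_links.append(f"- {_field(m, 'title')} ({_field(m, 'date')}) {url}")
--
--     # pass 2: context blocks come from the first MAX_CTX_CHUNKS hits
--     ctx_blocks = [_block(doc, m) for doc, m in hits[:MAX_CTX_CHUNKS]]
--
--     return "\n\n---\n\n".join(ctx_blocks), "\n".join(ref_links)
-- ===== Notes on version B (the rewrite author's own statement) =====
-- stated objective: simpler
-- what changed: Replaces A's single stateful loop with its early-break over four accumulators (ctx, refs, seen, break test) by two independent passes: a dedicated loop collecting the first two distinct reference urls, and a slice-comprehension hits[:4] for the context blocks.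
import Mathlib
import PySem

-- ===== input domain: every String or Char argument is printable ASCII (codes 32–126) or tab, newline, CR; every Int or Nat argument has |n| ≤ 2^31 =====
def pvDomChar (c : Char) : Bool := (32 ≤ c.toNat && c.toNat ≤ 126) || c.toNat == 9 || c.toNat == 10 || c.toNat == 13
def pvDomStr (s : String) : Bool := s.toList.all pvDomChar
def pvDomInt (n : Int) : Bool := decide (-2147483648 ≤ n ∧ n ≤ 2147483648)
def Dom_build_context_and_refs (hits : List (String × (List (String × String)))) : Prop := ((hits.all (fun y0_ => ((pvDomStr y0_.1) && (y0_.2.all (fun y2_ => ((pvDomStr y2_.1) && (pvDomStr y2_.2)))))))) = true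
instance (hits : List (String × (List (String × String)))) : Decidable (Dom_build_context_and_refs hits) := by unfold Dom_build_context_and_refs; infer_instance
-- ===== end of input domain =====

-- B replaces A's single stateful early-break loop by two independent passes (a ref-collecting
-- loop and a hits[:4] comprehension for the context blocks); objective: simpler.

-- shared formatting helpers (identical expressions in both Pythons)
-- (m.get(k) or "").strip() : a missing key and an empty value both yield "", so getD "" then strip is exact
def pvField (m : List (String × String)) (k : String) : String :=
  PySem.Str.strip ((PySem.Dict.mk m).getD k "")

-- f"- {title} ({date}) {url}"
def pvRef (m : List (String × String)) : String :=
  "- " ++ pvField m "title" ++ " (" ++ pvField m "date" ++ ") " ++ pvField m "url"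

-- f"[{title}] {date} {url}\nheading: {heading}\n{snippet}" with snippet truncation
def pvBlock (h : String × (List (String × String))) : String :=
  let snippet0 := PySem.Str.strip h.1
  let snippet := if 650 < PySem.Str.len snippet0
    then PySem.Str.slice snippet0 none (some 650) ++ "…" else snippet0
  "[" ++ pvField h.2 "title" ++ "] " ++ pvField h.2 "date" ++ " " ++ pvField h.2 "url" ++
    "\nheading: " ++ pvField h.2 "heading_path" ++ "\n" ++ snippet

-- ===== PORT A =====
-- A's loop: accumulators ctx_blocks, ref_links, seen; break once both limits are reached
def pvLoopA : List (String × (List (String × String))) → List String → List String →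
    PySem.Set String → List String × List String
  | [], ctx, refs, _ => (ctx, refs)
  | h :: t, ctx, refs, seen =>
    let url := pvField h.2 "url"
    let refs' := if url ≠ "" ∧ PySem.Set.contains seen url = false ∧ refs.length < 2
      then refs ++ [pvRef h.2] else refs
    let seen' := if url ≠ "" ∧ PySem.Set.contains seen url = false ∧ refs.length < 2
      then PySem.Set.add seen url else seen
    let ctx' := if ctx.length < 4 then ctx ++ [pvBlock h] else ctx
    if 2 ≤ refs'.length ∧ 4 ≤ ctx'.length then (ctx', refs')
    else pvLoopA t ctx' refs' seen'

def build_context_and_refs (hits : List (String × (List (String × String)))) : String × String :=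
  let r := pvLoopA hits [] [] PySem.Set.empty
  (PySem.Str.join "\n\n---\n\n" r.1, PySem.Str.join "\n" r.2)

-- ===== PORT B =====
-- pass 1 of Source B: collect the first two distinct truthy urls
def pvCollectRefs : List (String × (List (String × String))) → List String →
    PySem.Set String → List String
  | [], refs, _ => refs
  | h :: t, refs, seen =>
    let url := pvField h.2 "url"
    if url ≠ "" ∧ PySem.Set.contains seen url = false ∧ refs.length < 2
    then pvCollectRefs t (refs ++ [pvRef h.2]) (PySem.Set.add seen url)
    else pvCollectRefs t refs seen

def build_context_and_refs_alt (hits : List (String × (List (String × String)))) : String × String :=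
  (PySem.Str.join "\n\n---\n\n" ((hits.take 4).map pvBlock),
   PySem.Str.join "\n" (pvCollectRefs hits [] PySem.Set.empty))

-- ===== PRECONDITION & SPEC =====
def Spec_build_context_and_refs (hits : List (String × (List (String × String)))) (out : String × String) : Prop := out = build_context_and_refs_alt hits
instance (hits : List (String × (List (String × String)))) (out : String × String) : Decidable (Spec_build_context_and_refs hits out) := by unfold Spec_build_context_and_refs; infer_instance

-- ===== CLAIM (what is proved, stated in full; the proofs are below) =====
def Claim_equal_build_context_and_refs : Prop := ∀ (hits : List (String × (List (String × String)))), Dom_build_context_and_refs hits → Spec_build_context_and_refs hits (build_context_and_refs hits)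

-- ===== LEMMAS AND PROOFS =====

-- once two refs are collected, the ref pass adds nothing
lemma pvCollectRefs_full (t : List (String × (List (String × String))))
    (refs : List String) (seen : PySem.Set String) (h2 : 2 ≤ refs.length) :
    pvCollectRefs t refs seen = refs := by
  induction t generalizing seen with
  | nil => rfl
  | cons h t ih =>
    simp only [pvCollectRefs]
    rw [if_neg (by omega), ih]

-- A's loop is the two passes of B, for any accumulator state
lemma pvLoopA_eq (t : List (String × (List (String × String))))
    (ctx refs : List String) (seen : PySem.Set String) :
    pvLoopA t ctx refs seen =
      (ctx ++ (t.take (4 - ctx.length)).map pvBlock, pvCollectRefs t refs seen) := by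
  induction t generalizing ctx refs seen with
  | nil => simp [pvLoopA, pvCollectRefs]
  | cons h t ih =>
    simp only [pvLoopA, pvCollectRefs]
    by_cases hc : pvField h.2 "url" ≠ "" ∧
        PySem.Set.contains seen (pvField h.2 "url") = false ∧ refs.length < 2
    · simp only [if_pos hc]
      by_cases hctx : ctx.length < 4
      · have htake : (4 - ctx.length) = (3 - ctx.length) + 1 := by omega
        have hctx' : (ctx ++ [pvBlock h]).length = ctx.length + 1 := by simp
        by_cases hbr : 2 ≤ (refs ++ [pvRef h.2]).length ∧ 4 ≤ (ctx ++ [pvBlock h]).length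
        · rw [if_pos hctx, if_pos hbr, pvCollectRefs_full t _ _ hbr.1, htake]
          have : 3 - ctx.length = 0 := by omega
          simp [this]
        · rw [if_pos hctx, if_neg hbr, ih, htake]
          simp [List.take_succ_cons]
      · have htake : (4 - ctx.length) = 0 := by omega
        by_cases hbr : 2 ≤ (refs ++ [pvRef h.2]).length ∧ 4 ≤ ctx.length
        · rw [if_neg hctx, if_pos hbr, pvCollectRefs_full t _ _ hbr.1, htake]
          simp
        · rw [if_neg hctx, if_neg hbr, ih, htake]
          simp
    · simp only [if_neg hc]
      by_cases hctx : ctx.length < 4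
      · have hbr : ¬ (2 ≤ refs.length ∧ 4 ≤ (ctx ++ [pvBlock h]).length) ∨
            (2 ≤ refs.length ∧ 4 ≤ (ctx ++ [pvBlock h]).length) := (em _).symm
        by_cases hbr : 2 ≤ refs.length ∧ 4 ≤ (ctx ++ [pvBlock h]).length
        · rw [if_pos hctx, if_pos hbr, pvCollectRefs_full t _ _ hbr.1]
          have : 4 - ctx.length = (3 - ctx.length) + 1 := by omega
          have h0 : 3 - ctx.length = 0 := by simp at hbr; omega
          simp [this, h0]
        · rw [if_pos hctx, if_neg hbr, ih]
          have : 4 - ctx.length = (3 - ctx.length) + 1 := by omega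
          simp [this, List.take_succ_cons]
      · have htake : (4 - ctx.length) = 0 := by omega
        by_cases hbr : 2 ≤ refs.length ∧ 4 ≤ ctx.length
        · rw [if_neg hctx, if_pos hbr, pvCollectRefs_full t _ _ hbr.1, htake]; simp
        · rw [if_neg hctx, if_neg hbr, ih, htake]; simp

-- ===== VERDICT (by name: the statement is the Claim_ definition above) =====
theorem build_context_and_refs_spec : Claim_equal_build_context_and_refs := by
  intro hits _
  unfold Spec_build_context_and_refs build_context_and_refs build_context_and_refs_alt
  rw [pvLoopA_eq]
  simp
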